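/- GENERATED by c/gen_decode.py: decode facts of the image, one per distinct instruction byte string. -/
import UserX.DecodeImage

#decode_all Vorbis.Dec
  "0f570d2b630100"  -- xorps xmm1,XMMWORD PTR [rip+0x1632b]
  "0f84a6feffff"  -- je 114f0f
  "0f8578ffffff"  -- jne 10dcc2
  "0f8d91000000"  -- jge 111795
  "0fb60b"  -- movzx ecx,BYTE PTR [rbx]
  "2533333333"  -- and eax,0x33333333
  "3c64"  -- cmp al,0x64
  "410fb707"  -- movzx eax,WORD PTR [r15]
  "4183bc24e806000009"  -- cmp DWORD PTR [r12+0x6e8],0x9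
  "4189c5"  -- mov r13d,eax
  "418d4f02"  -- lea ecx,[r15+0x2]
  "41f73c24"  -- idiv DWORD PTR [r12]
  "440fbff3"  -- movsx r14d,bx
  "44886310"  -- mov BYTE PTR [rbx+0x10],r12b
  "4489ad20ffffff"  -- mov DWORD PTR [rbp-0xe0],r13d
  "448b65f4"  -- mov r12d,DWORD PTR [rbp-0xc]
  "448d6507"  -- lea r12d,[rbp+0x7]
  "45892e"  -- mov DWORD PTR [r14],r13d
  "458bbc2484000000"  -- mov r15d,DWORD PTR [r12+0x84]
  "4821f2"  -- and rdx,rsi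
  "4863f0"  -- movsxd rsi,eax
  "4883e820"  -- sub rax,0x20
  "48896c2460"  -- mov QWORD PTR [rsp+0x60],rbp
  "488b442408"  -- mov rax,QWORD PTR [rsp+0x8]
  "488b8d48ffffff"  -- mov rcx,QWORD PTR [rbp-0xb8]
  "488d53c0"  -- lea rdx,[rbx-0x40]
  "488d7c2450"  -- lea rdi,[rsp+0x50]
  "488dbb38080000"  -- lea rdi,[rbx+0x838]
  "488dbd40080000"  -- lea rdi,[rbp+0x840]
  "48c7442408600f1200"  -- mov QWORD PTR [rsp+0x8],0x120f60
  "49036f08"  -- add rbp,QWORD PTR [r15+0x8]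
  "49891c24"  -- mov QWORD PTR [r12],rbx
  "498d3c9f"  -- lea rdi,[r15+rbx*4]
  "498dbc24a8000000"  -- lea rdi,[r12+0xa8]
  "4a8b54f308"  -- mov rdx,QWORD PTR [rbx+r14*8+0x8]
  "4c01f7"  -- add rdi,r14
  "4c896c2430"  -- mov QWORD PTR [rsp+0x30],r13
  "4c8b6c2428"  -- mov r13,QWORD PTR [rsp+0x28]
  "4c8d636c"  -- lea r12,[rbx+0x6c]
  "4d85ed"  -- test r13,r13
  "4e8d34a3"  -- lea r14,[rbx+r12*4]
  "660f7eed"  -- movd ebp,xmm5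
  "66440f6ec5"  -- movd xmm8,ebp
  "7337"  -- jae 10bb68
  "7471"  -- je 119b92
  "75ce"  -- jne 10eae5
  "7d07"  -- jge 10329a
  "7f1d"  -- jg 10cd12
  "81fdfe000000"  -- cmp ebp,0xfe
  "83eb01"  -- sub ebx,0x1
  "894c2478"  -- mov DWORD PTR [rsp+0x78],ecx
  "89b574ffffff"  -- mov DWORD PTR [rbp-0x8c],esi
  "8b4500"  -- mov eax,DWORD PTR [rbp+0x0]
  "8b83e4060000"  -- mov eax,DWORD PTR [rbx+0x6e4]
  "8d68ff"  -- lea ebp,[rax-0x1]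
  "be22000000"  -- mov esi,0x22
  "c744240c00000100"  -- mov DWORD PTR [rsp+0xc],0x10000
  "c783f400c000f3f3f3f3"  -- mov DWORD PTR [rbx+0xc000f4],0xf3f3f3f3
  "e8069efeff"  -- call 100640
  "e81017ffff"  -- call 100800
  "e8199cffff"  -- call 100640
  "e8238bffff"  -- call 10cc80
  "e82ca6feff"  -- call 100300
  "e836c5feff"  -- call 100800
  "e841a7feff"  -- call 100640
  "e84bd3ffff"  -- call 100720
  "e856a6ffff"  -- call 100640
  "e863fbffff"  -- call 10e320
  "e86fb3ffff"  -- call 100640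
  "e87a71ffff"  -- call 102ca0
  "e885dbfeff"  -- call 103d00
  "e89039ffff"  -- call 100640
  "e89a0dffff"  -- call 100640
  "e8a4c0ffff"  -- call 104320
  "e8af85ffff"  -- call 1048e0
  "e8b878ffff"  -- call 100800
  "e8c2fdffff"  -- call 113660
  "e8cc2bffff"  -- call 100300
  "e8d6eafeff"  -- call 100720
  "e8e0fcffff"  -- call 103360
  "e8ea6affff"  -- call 100640
  "e8f1cffeff"  -- call 101520
  "e8fda6ffff"  -- call 100640
  "e935feffff"  -- jmp 10f70a
  "e97cfeffff"  -- jmp 110cad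
  "e9d4000000"  -- jmp 1117a6
  "eb3b"  -- jmp 115129
  "ebc5"  -- jmp 104f12
  "f20f111c24"  -- movsd QWORD PTR [rsp],xmm3
  "f20f59d8"  -- mulsd xmm3,xmm0
  "f30f1043f0"  -- movss xmm0,DWORD PTR [rbx-0x10]
  "f30f1065f8"  -- movss xmm4,DWORD PTR [rbp-0x8]
  "f30f1145b0"  -- movss DWORD PTR [rbp-0x50],xmm0
  "f30f1165c0"  -- movss DWORD PTR [rbp-0x40],xmm4
  "f30f5845fc"  -- addss xmm0,DWORD PTR [rbp-0x4]
  "f30f5975c0"  -- mulss xmm6,DWORD PTR [rbp-0x40]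
  "f30f5ce5"  -- subss xmm4,xmm5
  "f3410f114e04"  -- movss DWORD PTR [r14+0x4],xmm1
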